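-- pv_equiv track=rewrite | github.com/tedahn/ditto-factory | controller/src/controller/toolkits/discovery.py | _extract_first_paragraph
-- ===== SOURCE A (Python) =====
-- def _extract_first_paragraph(content: str) -> str:
--     """Return the first non-empty paragraph after any heading."""
--     lines = content.splitlines()
--     collecting = False
--     paragraph_lines: list[str] = []
--
--     for line in lines:
--         stripped = line.strip()
--
--         # Skip headings
--         if stripped.startswith("#"):
--             # If we already collected text, we're done
--             if paragraph_lines:
--                 break
--             collecting = True
--             continue
--
--         if not collecting:
--             # Before we hit a heading, start collecting from first
--             # non-empty line
--             if stripped: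
--                 collecting = True
--
--         if collecting:
--             if stripped:
--                 paragraph_lines.append(stripped)
--             elif paragraph_lines:
--                 # Empty line after paragraph content means end
--                 break
--
--     return " ".join(paragraph_lines)[:500] if paragraph_lines else ""
-- ===== SOURCE B (Python) =====
-- def _extract_first_paragraph(content: str) -> str:
--     """Return the first non-empty paragraph after any heading."""
--     stripped = [ln.strip() for ln in content.splitlines()]
--     good = [bool(t) and not t.startswith("#") for t in stripped]
--     if True not in good:
--         return ""
--     i = good.index(True)
--     tail = good[i:]
--     j = tail.index(False) if False in tail else len(tail)
--     return " ".join(stripped[i:i + j])[:500]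
-- ===== Notes on version B (the rewrite author's own statement) =====
-- stated objective: alternative
-- what changed: Replaces A's stateful collecting loop by a boolean content-mask over the stripped lines with index searches and slicing: find the first content index i via list.index, find the end j of that content run via index on the tail, and join stripped[i:i+j].
import Mathlib
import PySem

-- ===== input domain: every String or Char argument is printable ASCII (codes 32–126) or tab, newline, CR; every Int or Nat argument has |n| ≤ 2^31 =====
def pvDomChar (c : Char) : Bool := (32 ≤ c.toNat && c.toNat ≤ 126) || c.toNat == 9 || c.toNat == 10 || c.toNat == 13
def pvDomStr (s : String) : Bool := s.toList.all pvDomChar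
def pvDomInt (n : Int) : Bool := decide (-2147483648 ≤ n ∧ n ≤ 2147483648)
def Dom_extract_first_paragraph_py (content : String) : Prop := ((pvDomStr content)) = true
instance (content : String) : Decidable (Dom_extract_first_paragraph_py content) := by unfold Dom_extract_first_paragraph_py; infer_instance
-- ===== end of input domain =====

-- B replaces A's stateful collecting loop by a boolean content-mask with index searches and
-- slicing: find the first content index i, the end j of its run, and join stripped[i:i+j];
-- objective: alternative (index/slice formulation, same O(n) cost).

-- ===== PORT A =====
-- A's for-loop: state = (collecting flag, accumulated paragraph_lines); branches in A's order.
def pvALoop : List String → Bool → List String → List String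
  | [], _, acc => acc
  | l :: rest, collecting, acc =>
    let stripped := PySem.Str.strip l
    if PySem.Str.startswith stripped "#" then
      if acc ≠ [] then acc
      else pvALoop rest true acc
    else
      let collecting := if !collecting && stripped ≠ "" then true else collecting
      if collecting then
        if stripped ≠ "" then pvALoop rest collecting (acc ++ [stripped])
        else if acc ≠ [] then acc
        else pvALoop rest collecting acc
      else pvALoop rest collecting acc

def extract_first_paragraph_py (content : String) : String :=
  let lines := PySem.Str.splitlines content
  let paragraph_lines := pvALoop lines false []
  if paragraph_lines ≠ [] then
    PySem.Str.slice (PySem.Str.join " " paragraph_lines) none (some 500)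
  else ""

-- ===== PORT B =====
-- Source B's content predicate: non-blank and not a heading (the entries of the `good` mask).
def pvIsContent (t : String) : Bool := (t != "") && !PySem.Str.startswith t "#"

def extract_first_paragraph_py_alt (content : String) : String :=
  let stripped := (PySem.Str.splitlines content).map PySem.Str.strip
  let good := stripped.map pvIsContent
  if true ∈ good then
    let i := (PySem.List.index? good true).getD 0
    let tail := PySem.List.slice good (some (i : Int)) none
    let j := if false ∈ tail then (PySem.List.index? tail false).getD tail.length
             else tail.length
    PySem.Str.slice
      (PySem.Str.join " " (PySem.List.slice stripped (some (i : Int)) (some ((i : Int) + (j : Int)))))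
      none (some 500)
  else ""

-- ===== PRECONDITION & SPEC =====
def Spec_extract_first_paragraph_py (content : String) (out : String) : Prop := out = extract_first_paragraph_py_alt content
instance (content : String) (out : String) : Decidable (Spec_extract_first_paragraph_py content out) := by unfold Spec_extract_first_paragraph_py; infer_instance

-- ===== CLAIM =====
def Claim_equal_extract_first_paragraph_py : Prop := ∀ (content : String), Dom_extract_first_paragraph_py content → Spec_extract_first_paragraph_py content (extract_first_paragraph_py content)

-- ===== LEMMAS AND PROOFS =====

-- Proof-only reformulation of A: skip leading blanks/headings, then collect the content run.
def pvSkip : List String → List String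
  | [] => []
  | s :: rest => if s = "" || PySem.Str.startswith s "#" then pvSkip rest else s :: rest

def pvCollect : List String → List String
  | [] => []
  | s :: rest =>
    if s ≠ "" && !PySem.Str.startswith s "#" then s :: pvCollect rest else []

-- Once A is collecting with a non-empty accumulator, its loop appends exactly the collect phase.
lemma pvALoop_collect (ls : List String) (acc : List String) (h : acc ≠ []) :
    pvALoop ls true acc = acc ++ pvCollect (ls.map PySem.Str.strip) := by
  induction ls generalizing acc with
  | nil => simp [pvALoop, pvCollect]
  | cons l rest ih =>
    simp only [pvALoop, List.map_cons, pvCollect]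
    by_cases hh : PySem.Str.startswith (PySem.Str.strip l) "#" <;> simp at hh
    · simp [hh, h]
    · by_cases hs : PySem.Str.strip l = ""
      · simp [hs, h]
      · simp [hh, hs, ih (acc ++ [PySem.Str.strip l]) (by simp)]

-- With an empty accumulator A's loop (any flag value) computes skip-then-collect.
lemma pvALoop_skip (ls : List String) (c : Bool) :
    pvALoop ls c [] = pvCollect (pvSkip (ls.map PySem.Str.strip)) := by
  induction ls generalizing c with
  | nil => simp [pvALoop, pvSkip, pvCollect]
  | cons l rest ih =>
    simp only [pvALoop, List.map_cons, pvSkip]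
    by_cases hh : PySem.Str.startswith (PySem.Str.strip l) "#" <;> simp at hh
    · simp [hh, ih]
    · by_cases hs : PySem.Str.strip l = ""
      · cases c <;> simp [hs, ih]
      · simp [hh, hs, pvCollect, pvALoop_collect rest [PySem.Str.strip l] (by simp)]

-- index? specialisations for Bool masks.
lemma pvIdxTF (g : List Bool) :
    PySem.List.index? (true :: g) false = (PySem.List.index? g false).map (· + 1) :=
  PySem.List.index?_cons_of_ne g (by simp)

lemma pvIdxFT (g : List Bool) :
    PySem.List.index? (false :: g) true = (PySem.List.index? g true).map (· + 1) :=
  PySem.List.index?_cons_of_ne g (by simp)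

-- pvCollect / pvSkip step via the content predicate.
lemma pvCollect_cons (x : String) (xs : List String) :
    pvCollect (x :: xs) = if pvIsContent x then x :: pvCollect xs else [] := by
  simp only [pvCollect, pvIsContent]
  by_cases h1 : x = ""
  · simp [h1]
  · by_cases h2 : PySem.Str.startswith x "#" = true
    · simp only [h2]; simp [h1]
    · rw [Bool.not_eq_true] at h2
      simp only [h2]; simp [h1]

lemma pvSkip_cons (x : String) (xs : List String) :
    pvSkip (x :: xs) = if pvIsContent x then x :: xs else pvSkip xs := by
  simp only [pvSkip, pvIsContent]
  by_cases h1 : x = ""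
  · simp [h1]
  · by_cases h2 : PySem.Str.startswith x "#" = true
    · simp only [h2]; simp [h1]
    · rw [Bool.not_eq_true] at h2
      simp only [h2]; simp [h1]

-- B's end-of-run index search computes the collect phase.
lemma pvTake_j (xs : List String) :
    xs.take (if false ∈ xs.map pvIsContent
             then (PySem.List.index? (xs.map pvIsContent) false).getD (xs.map pvIsContent).length
             else (xs.map pvIsContent).length) = pvCollect xs := by
  induction xs with
  | nil => simp [pvCollect]
  | cons x xs ih =>
    rw [pvCollect_cons, List.map_cons]
    by_cases h : pvIsContent x
    · rw [h, if_pos rfl, pvIdxTF]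
      by_cases hm : false ∈ xs.map pvIsContent
      · rw [if_pos (List.mem_cons_of_mem _ hm)]
        rw [if_pos hm] at ih
        obtain ⟨k, hk⟩ := Option.isSome_iff_exists.mp
          ((PySem.List.index?_isSome_iff (xs := xs.map pvIsContent) (v := false)).mpr hm)
        rw [hk] at ih ⊢
        simpa using ih
      · rw [if_neg (show false ∉ true :: xs.map pvIsContent by simp [hm])]
        rw [if_neg hm] at ih
        rw [List.length_cons, List.take_succ_cons, ih]
    · rw [Bool.not_eq_true] at h
      rw [h, if_pos (List.mem_cons_self ..), PySem.List.index?_cons_self]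
      simp

-- B's first-content index search computes the skip phase.
lemma pvDrop_i (xs : List String) (hmem : true ∈ xs.map pvIsContent) :
    xs.drop ((PySem.List.index? (xs.map pvIsContent) true).getD 0) = pvSkip xs := by
  induction xs with
  | nil => simp at hmem
  | cons x xs ih =>
    rw [pvSkip_cons, List.map_cons]
    by_cases h : pvIsContent x
    · rw [h, if_pos rfl, PySem.List.index?_cons_self]
      simp
    · rw [Bool.not_eq_true] at h
      simp only [List.map_cons] at hmem
      rw [h] at hmem
      have hmem' : true ∈ xs.map pvIsContent := by
        rcases List.mem_cons.mp hmem with h1 | h1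
        · simp at h1
        · exact h1
      rw [h, if_neg (by simp), pvIdxFT]
      have hih := ih hmem'
      obtain ⟨k, hk⟩ := Option.isSome_iff_exists.mp
        ((PySem.List.index?_isSome_iff (xs := xs.map pvIsContent) (v := true)).mpr hmem')
      rw [hk] at hih ⊢
      simpa using hih

-- If some line is content, the skip phase ends at a content line.
lemma pvSkip_content (xs : List String) (hmem : true ∈ xs.map pvIsContent) :
    ∃ y ys, pvSkip xs = y :: ys ∧ pvIsContent y := by
  induction xs with
  | nil => simp at hmem
  | cons x xs ih =>
    rw [pvSkip_cons]
    by_cases h : pvIsContent x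
    · exact ⟨x, xs, by simp [h], h⟩
    · simp only [List.map_cons, List.mem_cons] at hmem
      rcases hmem with h1 | h1
      · exact absurd h1.symm (by simpa using h)
      · simpa [h] using ih h1

-- If no line is content, skip-then-collect is empty.
lemma pvNoContent (xs : List String) (hmem : true ∉ xs.map pvIsContent) :
    pvCollect (pvSkip xs) = [] := by
  induction xs with
  | nil => simp [pvSkip, pvCollect]
  | cons x xs ih =>
    rw [pvSkip_cons]
    simp only [List.map_cons, List.mem_cons, not_or] at hmem
    have hx : ¬ pvIsContent x = true := fun h => hmem.1 h.symm
    rw [if_neg hx]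
    exact ih hmem.2

-- ===== VERDICT =====
theorem extract_first_paragraph_py_spec : Claim_equal_extract_first_paragraph_py := by
  intro content _
  unfold Spec_extract_first_paragraph_py extract_first_paragraph_py extract_first_paragraph_py_alt
  simp only [pvALoop_skip]
  set s := (PySem.Str.splitlines content).map PySem.Str.strip with hs
  by_cases hmem : true ∈ s.map pvIsContent
  · have hdrop := pvDrop_i s hmem
    rw [if_pos hmem]
    rw [PySem.List.slice_from_natCast, PySem.List.slice_natCast_add]
    rw [← List.map_drop, hdrop, pvTake_j]
    have hne : pvCollect (pvSkip s) ≠ [] := by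
      rcases pvSkip_content s hmem with ⟨y, ys, hsk, hy⟩
      rw [hsk, pvCollect_cons, if_pos hy]
      simp
    rw [if_pos hne]
  · rw [if_neg hmem, pvNoContent s hmem]
    simp
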